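-- pv_equiv track=rewrite | github.com/Daneteee/DAW | 1r DAW/UF3/DanMaldonado_MP03UF3_Exercici3/ex2.py | retorna_substitucio
-- ===== SOURCE A (Python) =====
-- vocals = "aeiou"
--
-- def retorna_substitucio(string, vocal):
--     """Retornem una nova string basada en la string pasada per paràmetre amb les
--     vocals canviades per la vocal que es rep per paràmetre
--
--     Args:
--         string (string): La string a la qual es canviarán les vocals.
--         vocal (string): Vocal la qual utilitzarà per canviar la resta de vocals.
--
--     Returns:
--         string: Retorna la nova string amb les vocals canviades.
--     """
--     nova_string = ""
--
--     for lletra in string: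
--         if lletra in vocals:
--             nova_string += vocal
--
--         elif lletra in vocals.upper():
--             nova_string += vocal.upper()
--
--         else:
--             nova_string += lletra
--
--     return nova_string
-- ===== SOURCE B (Python) =====
-- vocals = "aeiou"
--
-- def retorna_substitucio(string, vocal):
--     """Replace each lowercase vowel with `vocal` and each uppercase vowel with
--     `vocal.upper()` using a precomputed translation table and one translate pass."""
--     table = {v: vocal for v in vocals}
--     table.update({v.upper(): vocal.upper() for v in vocals})
--     return string.translate(str.maketrans(table))
-- ===== Notes on version B (the rewrite author's own statement) =====
-- stated objective: idiomatic
-- what changed: Replaces the explicit if/elif/else string-append loop with a precomputed str.maketrans translation table (lowercase vowel -> vocal, uppercase vowel -> vocal.upper()) applied in a single str.translate pass.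
import Mathlib
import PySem

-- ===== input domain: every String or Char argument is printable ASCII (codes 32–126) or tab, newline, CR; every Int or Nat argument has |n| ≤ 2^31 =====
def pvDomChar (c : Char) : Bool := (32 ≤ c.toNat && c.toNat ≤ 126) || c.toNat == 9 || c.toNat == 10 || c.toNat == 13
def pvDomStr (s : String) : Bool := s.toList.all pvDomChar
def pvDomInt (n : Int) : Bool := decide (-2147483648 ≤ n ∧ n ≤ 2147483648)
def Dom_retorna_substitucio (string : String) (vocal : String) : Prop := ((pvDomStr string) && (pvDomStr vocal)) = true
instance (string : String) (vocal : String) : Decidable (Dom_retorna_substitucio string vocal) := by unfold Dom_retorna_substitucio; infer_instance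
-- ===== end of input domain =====

-- B replaces A's explicit if/elif/else append loop with a precomputed translation
-- table applied in a single translate pass; same cost, more idiomatic.

-- ===== PORT A =====
-- module constant: vocals = "aeiou"
def pvVocals : List Char := ['a', 'e', 'i', 'o', 'u']

-- literal transliteration of A's loop: accumulate nova_string, branch per letter
def retorna_substitucio (string : String) (vocal : String) : String :=
  String.ofList (string.toList.foldl (fun nova lletra =>
    if lletra ∈ pvVocals then nova ++ vocal.toList
    else if lletra ∈ PySem.Chars.upper pvVocals then nova ++ PySem.Chars.upper vocal.toList
    else nova ++ [lletra]) [])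

-- ===== PORT B =====
-- the translation table: {v: vocal for v in vocals} updated with the uppercase entries
def pvTable (vocal : String) : PySem.Dict Char (List Char) :=
  let d := pvVocals.foldl (fun d v => d.insert v vocal.toList) (PySem.Dict.empty)
  (PySem.Chars.upper pvVocals).foldl (fun d v => d.insert v (PySem.Chars.upper vocal.toList)) d

-- str.translate: each character mapped through the table (identity when absent)
def retorna_substitucio_alt (string : String) (vocal : String) : String :=
  String.ofList (string.toList.flatMap (fun c => ((pvTable vocal).get? c).getD [c]))

-- ===== PRECONDITION & SPEC =====
def Spec_retorna_substitucio (string : String) (vocal : String) (out : String) : Prop := out = retorna_substitucio_alt string vocal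
instance (string : String) (vocal : String) (out : String) : Decidable (Spec_retorna_substitucio string vocal out) := by unfold Spec_retorna_substitucio; infer_instance

-- ===== CLAIM (what is proved, stated in full; the proofs are below) =====
def Claim_equal_retorna_substitucio : Prop := ∀ (string : String) (vocal : String), Dom_retorna_substitucio string vocal → Spec_retorna_substitucio string vocal (retorna_substitucio string vocal)

-- ===== LEMMAS AND PROOFS =====

-- the table built by B's two dict-comprehension folds, written out as a literal dict
lemma pvTable_eq (vocal : String) : pvTable vocal = PySem.Dict.mk
    [('a', vocal.toList), ('e', vocal.toList), ('i', vocal.toList), ('o', vocal.toList), ('u', vocal.toList),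
     ('A', PySem.Chars.upper vocal.toList), ('E', PySem.Chars.upper vocal.toList), ('I', PySem.Chars.upper vocal.toList),
     ('O', PySem.Chars.upper vocal.toList), ('U', PySem.Chars.upper vocal.toList)] := by
  unfold pvTable
  rw [show PySem.Chars.upper pvVocals = ['A','E','I','O','U'] from by decide]
  simp [pvVocals, PySem.Dict.insert, PySem.Dict.empty, PySem.Dict.contains]

-- table lookup as an if-chain over the ten vowel keys
lemma pv_get (vocal : String) (c : Char) : (pvTable vocal).get? c =
    if c = 'a' then some vocal.toList else if c = 'e' then some vocal.toList
    else if c = 'i' then some vocal.toList else if c = 'o' then some vocal.toList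
    else if c = 'u' then some vocal.toList
    else if c = 'A' then some (PySem.Chars.upper vocal.toList)
    else if c = 'E' then some (PySem.Chars.upper vocal.toList)
    else if c = 'I' then some (PySem.Chars.upper vocal.toList)
    else if c = 'O' then some (PySem.Chars.upper vocal.toList)
    else if c = 'U' then some (PySem.Chars.upper vocal.toList) else none := by
  rw [pvTable_eq]
  simp only [PySem.Dict.get?_mk_cons, beq_iff_eq]
  simp [PySem.Dict.get?, eq_comm]

-- per-character agreement of A's branch chain with B's table lookup
lemma pv_char_eq (vocal : String) (c : Char) :
    (if c ∈ pvVocals then vocal.toList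
     else if c ∈ PySem.Chars.upper pvVocals then PySem.Chars.upper vocal.toList
     else [c])
    = (((pvTable vocal).get? c).getD [c]) := by
  rw [pv_get, show PySem.Chars.upper pvVocals = ['A','E','I','O','U'] from by decide]
  by_cases h0 : c = 'a'
  · subst h0; simp [pvVocals]
  by_cases h1 : c = 'e'
  · subst h1; simp [pvVocals]
  by_cases h2 : c = 'i'
  · subst h2; simp [pvVocals]
  by_cases h3 : c = 'o'
  · subst h3; simp [pvVocals]
  by_cases h4 : c = 'u'
  · subst h4; simp [pvVocals]
  by_cases h5 : c = 'A'
  · subst h5; simp [pvVocals]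
  by_cases h6 : c = 'E'
  · subst h6; simp [pvVocals]
  by_cases h7 : c = 'I'
  · subst h7; simp [pvVocals]
  by_cases h8 : c = 'O'
  · subst h8; simp [pvVocals]
  by_cases h9 : c = 'U'
  · subst h9; simp [pvVocals]
  simp [pvVocals, h0,h1,h2,h3,h4,h5,h6,h7,h8,h9]

-- ===== VERDICT (by name: the statement is the Claim_ definition above) =====
theorem retorna_substitucio_spec : Claim_equal_retorna_substitucio := by
  intro string vocal _
  show retorna_substitucio string vocal = retorna_substitucio_alt string vocal
  unfold retorna_substitucio retorna_substitucio_alt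
  congr 1
  have hfun : (fun (nova : List Char) (lletra : Char) =>
      if lletra ∈ pvVocals then nova ++ vocal.toList
      else if lletra ∈ PySem.Chars.upper pvVocals then nova ++ PySem.Chars.upper vocal.toList
      else nova ++ [lletra])
      = (fun nova lletra => nova ++ (((pvTable vocal).get? lletra).getD [lletra])) := by
    funext nova lletra
    rw [← pv_char_eq vocal lletra]
    split_ifs <;> rfl
  rw [hfun, PySem.List.foldl_append_eq_flatMap]
  simp
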